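-- pv_equiv track=rewrite | github.com/uchicagotechteam/HourVoice | disambiguation/levenshtein.py | collapse_delimiters
-- ===== SOURCE A (Python) =====
-- def collapse_delimiters(s, delimiter=' '):
--     i, n = 0, len(s)
--     res = ''
--     while i < n:
--         if s[i].isalnum():
--             res += s[i]
--             i += 1
--         else:
--             res += delimiter
--             while i < n and not s[i].isalnum():
--                 i += 1
--     return res
-- ===== SOURCE B (Python) =====
-- from itertools import groupby
--
-- def collapse_delimiters(s, delimiter=' '):
--     pieces = []
--     for key, grp in groupby(s, key=lambda c: c.isalnum()):
--         pieces.append(''.join(grp) if key else delimiter)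
--     return ''.join(pieces)
-- ===== Notes on version B (the rewrite author's own statement) =====
-- stated objective: idiomatic
-- what changed: Replaced the index-driven while loop with its nested skip loop by itertools.groupby on c.isalnum(): maximal same-kind runs are mapped to their text or the delimiter and joined once, avoiding A's repeated string concatenation.
import Mathlib
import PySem

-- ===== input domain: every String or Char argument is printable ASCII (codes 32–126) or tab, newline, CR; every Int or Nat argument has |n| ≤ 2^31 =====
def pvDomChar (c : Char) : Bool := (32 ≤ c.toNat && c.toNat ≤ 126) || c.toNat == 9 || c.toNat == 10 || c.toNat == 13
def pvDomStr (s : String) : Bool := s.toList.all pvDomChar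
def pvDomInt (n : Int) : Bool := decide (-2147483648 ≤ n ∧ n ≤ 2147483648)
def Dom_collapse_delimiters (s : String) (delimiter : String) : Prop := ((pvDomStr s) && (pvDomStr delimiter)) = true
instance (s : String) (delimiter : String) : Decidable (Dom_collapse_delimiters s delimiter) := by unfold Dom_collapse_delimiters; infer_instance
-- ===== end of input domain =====

-- ===== PORT A =====
-- B changes only the decomposition (groupby over runs instead of an index loop); same return value.
def pvSkipA : List Char → List Char
  | [] => []
  | c :: rest => if PySem.Chars.isalnum c then c :: rest else pvSkipA rest

theorem pvSkipA_length_le : ∀ cs : List Char, (pvSkipA cs).length ≤ cs.length := by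
  intro cs
  induction cs with
  | nil => simp [pvSkipA]
  | cons c rest ih =>
    simp only [pvSkipA]
    split
    · exact Nat.le_refl _
    · exact Nat.le_trans ih (Nat.le_succ _)

-- inner 'while i < n and not s[i].isalnum(): i += 1' is pvSkipA; the outer while is pvGoA
def pvGoA (delim : List Char) : List Char → List Char
  | [] => []
  | c :: rest =>
    if PySem.Chars.isalnum c then c :: pvGoA delim rest
    else delim ++ pvGoA delim (pvSkipA rest)
termination_by cs => cs.length
decreasing_by
  · simp
  · simp
    exact pvSkipA_length_le rest

def collapse_delimiters (s : String) (delimiter : String) : String :=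
  String.ofList (pvGoA delimiter.toList s.toList)

-- ===== PORT B =====
-- itertools.groupby(s, key=isalnum): list of (key, run) pairs over maximal same-key runs
def pvGroupby : List Char → List (Bool × List Char)
  | [] => []
  | c :: rest =>
    (PySem.Chars.isalnum c,
      c :: rest.takeWhile (fun d => PySem.Chars.isalnum d == PySem.Chars.isalnum c)) ::
      pvGroupby (rest.dropWhile (fun d => PySem.Chars.isalnum d == PySem.Chars.isalnum c))
termination_by cs => cs.length
decreasing_by
  simp
  exact List.length_dropWhile_le _ _

def collapse_delimiters_alt (s : String) (delimiter : String) : String :=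
  String.ofList
    (((pvGroupby s.toList).map (fun g => if g.1 then g.2 else delimiter.toList)).flatten)

-- ===== PRECONDITION & SPEC =====
def Spec_collapse_delimiters (s : String) (delimiter : String) (out : String) : Prop := out = collapse_delimiters_alt s delimiter
instance (s : String) (delimiter : String) (out : String) : Decidable (Spec_collapse_delimiters s delimiter out) := by unfold Spec_collapse_delimiters; infer_instance

-- ===== CLAIM (what is proved, stated in full; the proofs are below) =====
def Claim_equal_collapse_delimiters : Prop := ∀ (s : String) (delimiter : String), Dom_collapse_delimiters s delimiter → Spec_collapse_delimiters s delimiter (collapse_delimiters s delimiter)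

-- ===== LEMMAS AND PROOFS =====
theorem pvSkipA_of_not_alnum (xs ys : List Char)
    (h : ∀ x ∈ xs, PySem.Chars.isalnum x = false) :
    pvSkipA (xs ++ ys) = pvSkipA ys := by
  induction xs with
  | nil => rfl
  | cons x xs ih =>
    have hx := h x (List.mem_cons_self ..)
    simp only [List.cons_append, pvSkipA, hx]
    simp only [Bool.false_eq_true, if_false]
    exact ih (fun a ha => h a (List.mem_cons_of_mem _ ha))

theorem pvSkipA_alnum_head (ys : List Char)
    (h : ∀ c t, ys = c :: t → PySem.Chars.isalnum c = true) :
    pvSkipA ys = ys := by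
  cases ys with
  | nil => rfl
  | cons c t => simp [pvSkipA, h c t rfl]

theorem pvGoA_run (delim : List Char) (xs ys : List Char)
    (h : ∀ x ∈ xs, PySem.Chars.isalnum x = true) :
    pvGoA delim (xs ++ ys) = xs ++ pvGoA delim ys := by
  induction xs with
  | nil => rfl
  | cons x xs ih =>
    have hx := h x (List.mem_cons_self ..)
    simp only [List.cons_append, pvGoA, hx, if_true]
    rw [ih (fun a ha => h a (List.mem_cons_of_mem _ ha))]

theorem dropWhile_head_not {p : Char → Bool} (l : List Char) :
    ∀ c t, l.dropWhile p = c :: t → p c = false := by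
  induction l with
  | nil => intro c t h; simp at h
  | cons x xs ih =>
    intro c t h
    by_cases hx : p x = true
    · rw [List.dropWhile_cons_of_pos hx] at h; exact ih c t h
    · rw [List.dropWhile_cons_of_neg hx] at h
      cases h; simpa using hx

theorem pvGoA_eq_groupby (delim : List Char) :
    ∀ (n : Nat) (cs : List Char), cs.length ≤ n →
      pvGoA delim cs
        = ((pvGroupby cs).map (fun g => if g.1 then g.2 else delim)).flatten := by
  intro n
  induction n with
  | zero =>
    intro cs h
    have : cs = [] := List.eq_nil_of_length_eq_zero (Nat.le_zero.mp h)
    subst this; simp [pvGoA, pvGroupby]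
  | succ n ih =>
    intro cs h
    cases cs with
    | nil => simp [pvGoA, pvGroupby]
    | cons c rest =>
      simp only [pvGroupby]
      set p := fun d => PySem.Chars.isalnum d == PySem.Chars.isalnum c with hp
      have htd : rest.takeWhile p ++ rest.dropWhile p = rest := List.takeWhile_append_dropWhile
      have hlen : (rest.dropWhile p).length ≤ n := by
        have := List.length_dropWhile_le p rest
        have : (rest.dropWhile p).length ≤ rest.length := this
        simp at h; omega
      have htake : ∀ x ∈ rest.takeWhile p, PySem.Chars.isalnum x = PySem.Chars.isalnum c := by
        intro x hx
        have := List.mem_takeWhile_imp hx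
        simpa [hp] using this
      have hdrop : ∀ a t, rest.dropWhile p = a :: t →
          PySem.Chars.isalnum a = !(PySem.Chars.isalnum c) := by
        intro a t hat
        have := dropWhile_head_not (p := p) rest a t hat
        simp only [hp, beq_eq_false_iff_ne, ne_eq] at this
        cases hca : PySem.Chars.isalnum c <;> cases haa : PySem.Chars.isalnum a <;>
          simp_all
      by_cases hc : PySem.Chars.isalnum c = true
      · -- alphanumeric run
        simp only [hc, if_true, List.map_cons, List.flatten_cons]
        have hrun : ∀ x ∈ c :: rest.takeWhile p, PySem.Chars.isalnum x = true := by
          intro x hx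
          rcases List.mem_cons.mp hx with h1 | h1
          · subst h1; exact hc
          · rw [htake x h1]; exact hc
        calc pvGoA delim (c :: rest)
            = pvGoA delim ((c :: rest.takeWhile p) ++ rest.dropWhile p) := by
              rw [List.cons_append, htd]
          _ = (c :: rest.takeWhile p) ++ pvGoA delim (rest.dropWhile p) :=
              pvGoA_run delim _ _ hrun
          _ = _ := by rw [ih _ hlen]
      · -- delimiter run
        have hcf : PySem.Chars.isalnum c = false := by simpa using hc
        simp only [hcf, Bool.false_eq_true, if_false, List.map_cons, List.flatten_cons]
        have hnotrun : ∀ x ∈ rest.takeWhile p, PySem.Chars.isalnum x = false := by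
          intro x hx; rw [htake x hx]; exact hcf
        have hstep : pvGoA delim (c :: rest)
            = delim ++ pvGoA delim (pvSkipA rest) := by
          simp [pvGoA, hcf]
        rw [hstep]
        have hskip : pvSkipA rest = rest.dropWhile p := by
          conv_lhs => rw [← htd]
          rw [pvSkipA_of_not_alnum _ _ hnotrun]
          apply pvSkipA_alnum_head
          intro a t hat
          have := hdrop a t hat
          rw [this, hcf]; rfl
        rw [hskip, ih _ hlen]

-- ===== VERDICT (by name: the statement is the Claim_ definition above) =====
theorem collapse_delimiters_spec : Claim_equal_collapse_delimiters := by
  intro s delimiter _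
  unfold Spec_collapse_delimiters collapse_delimiters collapse_delimiters_alt
  rw [pvGoA_eq_groupby delimiter.toList s.toList.length s.toList Nat.le.refl]
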